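-- pv_equiv track=rewrite | github.com/Jonathan-Monir/DSP-Tasks | pages/Resampling.py | Upsample
-- ===== SOURCE A (Python) =====
-- def convolve(input_signal, filter_kernel, start_value):
--     input_len = len(input_signal)
--     filter_len = len(filter_kernel)
--
--     if input_len == 0 or filter_len == 0:
--         raise ValueError("Input signals cannot be empty for convolution.")
--
--     output_len = input_len + filter_len - 1
--
--     output_signal = [0] * output_len
--
--     for i in range(output_len):
--         for j in range(filter_len):
--             if i - j >= 0 and i - j < input_len:
--                 output_signal[i] += input_signal[i - j] * filter_kernel[j]
--
--     output_indices = list(range(start_value, start_value + output_len))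
--
--     return output_indices, output_signal
--
-- def Upsample(signals,Y, L, start_value):
--     upsampled_signals = []
--     for index, signal in enumerate(signals):
--         upsampled_signals.append(signal)
--
--         if index == len(signals) - 1:
--             break
--
--         for _ in range(L-1):
--             upsampled_signals.append(0)
--     upsampled_signals = convolve(upsampled_signals,Y,start_value)
--     return upsampled_signals
-- ===== SOURCE B (Python) =====
-- def Upsample(signals, Y, L, start_value):
--     n, m = len(signals), len(Y)
--     if n == 0 or m == 0:
--         raise ValueError("Input signals cannot be empty for convolution.")
--     step = L if L > 1 else 1
--     out_len = (n - 1) * step + m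
--     out = [0] * out_len
--     for k, s in enumerate(signals):
--         base = k * step
--         for j, y in enumerate(Y):
--             out[base + j] += s * y
--     return list(range(start_value, start_value + out_len)), out
-- ===== Notes on version B (the rewrite author's own statement) =====
-- stated objective: faster
-- what changed: A materialises the zero-stuffed signal and convolves every one of its ~n*L samples against the kernel; B never builds the stuffed signal and instead scatter-adds each of the n original samples times the kernel directly at its output offset k*step+j.
import Mathlib
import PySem

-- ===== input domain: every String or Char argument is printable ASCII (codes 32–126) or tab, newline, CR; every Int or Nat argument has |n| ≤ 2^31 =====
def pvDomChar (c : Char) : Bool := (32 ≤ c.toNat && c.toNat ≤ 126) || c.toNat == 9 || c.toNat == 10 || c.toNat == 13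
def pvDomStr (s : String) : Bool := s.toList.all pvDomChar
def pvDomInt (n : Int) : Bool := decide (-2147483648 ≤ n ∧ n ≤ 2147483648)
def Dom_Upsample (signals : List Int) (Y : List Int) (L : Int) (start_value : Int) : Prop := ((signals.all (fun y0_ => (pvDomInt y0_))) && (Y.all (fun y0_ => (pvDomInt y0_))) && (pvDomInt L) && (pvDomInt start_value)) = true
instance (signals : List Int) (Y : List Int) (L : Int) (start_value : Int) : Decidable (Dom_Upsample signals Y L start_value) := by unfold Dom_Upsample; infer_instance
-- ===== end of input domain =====

-- B replaces A's convolution over the full zero-stuffed signal by a scatter over the original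
-- samples only (skipping the inserted zeros): O(n·m) instead of O(n·L·m) — objective: faster.

-- ===== PORT A =====
-- 'for index, signal in enumerate(signals): append signal; if index == len-1: break; append L-1 zeros'
def pvBuildUp (L : Int) (n : Nat) : Nat → List Int → List Int
  | _, [] => []
  | i, s :: rest =>
    if i = n - 1 then [s]
    else s :: (List.replicate (L - 1).toNat 0 ++ pvBuildUp L n (i + 1) rest)

-- convolve(input, Y, start_value); the empty-input ValueError branch is excluded by Pre_Upsample
def pvConvolve (input : List Int) (Y : List Int) (sv : Int) : List Int × List Int :=
  let n : Int := input.length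
  let m : Int := Y.length
  let outLen : Int := n + m - 1
  let out := (PySem.List.pyRange 0 outLen 1).foldl (fun acc i =>
      (PySem.List.pyRange 0 m 1).foldl (fun a2 j =>
        if i - j ≥ 0 ∧ i - j < n then
          PySem.List.pySetD a2 i (PySem.List.pyGetD a2 i 0 +
            PySem.List.pyGetD input (i - j) 0 * PySem.List.pyGetD Y j 0)
        else a2) acc)
    (PySem.List.pyRepeat [0] outLen)
  (PySem.List.pyRange sv (sv + outLen) 1, out)

def Upsample (signals : List Int) (Y : List Int) (L : Int) (start_value : Int) : List Int × List Int :=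
  pvConvolve (pvBuildUp L signals.length 0 signals) Y start_value

-- ===== PORT B =====
def Upsample_alt (signals : List Int) (Y : List Int) (L : Int) (start_value : Int) : List Int × List Int :=
  let n : Int := signals.length
  let m : Int := Y.length
  let step : Int := if L > 1 then L else 1
  let outLen : Int := (n - 1) * step + m
  let out := (PySem.List.enumerate signals).foldl (fun acc ks =>
      (PySem.List.enumerate Y).foldl (fun a2 jy =>
        PySem.List.pySetD a2 (ks.1 * step + jy.1) (PySem.List.pyGetD a2 (ks.1 * step + jy.1) 0 + ks.2 * jy.2)) acc)
    (PySem.List.pyRepeat [0] outLen)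
  (PySem.List.pyRange start_value (start_value + outLen) 1, out)

-- ===== PRECONDITION & SPEC =====
-- Pre_ excludes exactly the inputs where A raises ValueError: empty signals or empty kernel.
def Pre_Upsample (signals : List Int) (Y : List Int) (L : Int) (start_value : Int) : Prop :=
  signals ≠ [] ∧ Y ≠ []
instance (signals : List Int) (Y : List Int) (L : Int) (start_value : Int) : Decidable (Pre_Upsample signals Y L start_value) := by unfold Pre_Upsample; infer_instance

def pvWitness_Upsample : List Int × List Int × Int × Int := ([1, 2, 3], [1, -1], 2, 0)

def Spec_Upsample (signals : List Int) (Y : List Int) (L : Int) (start_value : Int) (out : List Int × List Int) : Prop := out = Upsample_alt signals Y L start_value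
instance (signals : List Int) (Y : List Int) (L : Int) (start_value : Int) (out : List Int × List Int) : Decidable (Spec_Upsample signals Y L start_value out) := by unfold Spec_Upsample; infer_instance

-- ===== CLAIM (what is proved, stated in full; the proofs are below) =====
def Claim_equal_Upsample : Prop := ∀ (signals : List Int) (Y : List Int) (L : Int) (start_value : Int), Dom_Upsample signals Y L start_value → Pre_Upsample signals Y L start_value → Spec_Upsample signals Y L start_value (Upsample signals Y L start_value)

-- ===== LEMMAS AND PROOFS =====

-- step between consecutive original samples in the zero-stuffed signal, as a Nat
def pvStep (L : Int) : Nat := (L - 1).toNat + 1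

-- applying a list of additive updates (index, value) to a list
def pvApply (ps : List (Nat × Int)) (init : List Int) : List Int :=
  ps.foldl (fun a p => a.set p.1 (a.getD p.1 0 + p.2)) init

lemma pvStep_cast (L : Int) : ((pvStep L : Nat) : Int) = if L > 1 then L else 1 := by
  unfold pvStep; split <;> omega

lemma pv_getD_set (l : List Int) (i t : Nat) (v : Int) (h : i < l.length) :
    (l.set i v).getD t 0 = if t = i then v else l.getD t 0 := by
  rcases eq_or_ne t i with rfl | hne
  · rw [List.getD_eq_getElem _ _ (by simpa using h)]
    simp
  · by_cases ht : t < l.length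
    · rw [List.getD_eq_getElem _ _ (by simpa using ht), List.getD_eq_getElem _ _ ht,
        List.getElem_set_ne (by omega)]
      simp [hne]
    · rw [List.getD_eq_default _ _ (by simpa using ht), List.getD_eq_default _ _ (by omega)]
      simp [hne]

lemma pv_length_apply (ps : List (Nat × Int)) : ∀ init, (pvApply ps init).length = init.length := by
  induction ps with
  | nil => intro init; rfl
  | cons p ps ih =>
    intro init
    simp only [pvApply, List.foldl_cons] at *
    rw [ih]
    exact List.length_set

lemma pv_apply_cons (p : Nat × Int) (ps : List (Nat × Int)) (init : List Int) :
    pvApply (p :: ps) init = pvApply ps (init.set p.1 (init.getD p.1 0 + p.2)) := rfl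

lemma pv_apply_getD (ps : List (Nat × Int)) : ∀ (init : List Int),
    (∀ p ∈ ps, p.1 < init.length) → ∀ t,
    (pvApply ps init).getD t 0
      = init.getD t 0 + (ps.map (fun p => if p.1 = t then p.2 else 0)).sum := by
  induction ps with
  | nil => intro init _ t; simp [pvApply]
  | cons p ps ih =>
    intro init h t
    rw [pv_apply_cons, ih _ (by intro q hq; rw [List.length_set]; exact h q (by simp [hq]))]
    rw [pv_getD_set _ _ _ _ (h p (by simp))]
    rcases eq_or_ne t p.1 with rfl | hne
    · simp only [List.map_cons, List.sum_cons, if_true]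
      ring
    · simp only [List.map_cons, List.sum_cons, if_neg (Ne.symm hne), if_neg hne]
      ring

lemma pv_apply_zero (p : Nat × Int) (init : List Int) (hz : p.2 = 0) (h : p.1 < init.length) :
    init.set p.1 (init.getD p.1 0 + p.2) = init := by
  rw [hz, add_zero, List.getD_eq_getElem _ _ h, List.set_getElem_self]

lemma pv_foldl_apply_flatMap {α : Type} (g : α → List (Nat × Int)) :
    ∀ (l : List α) (init : List Int),
    l.foldl (fun acc x => pvApply (g x) acc) init = pvApply (l.flatMap g) init := by
  intro l
  induction l with
  | nil => intro init; rfl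
  | cons x l ih =>
    intro init
    simp only [List.foldl_cons, List.flatMap_cons, pvApply, List.foldl_append]
    exact ih _

lemma pv_sum_map_range (f : Nat → Int) (n : Nat) :
    ((List.range n).map f).sum = ∑ i ∈ Finset.range n, f i := by
  induction n with
  | zero => simp
  | succ n ih => rw [List.range_succ, Finset.sum_range_succ]; simp [ih]

lemma pv_sum_flatMap {α : Type} (g : α → List Int) (l : List α) :
    (l.flatMap g).sum = (l.map (fun x => (g x).sum)).sum := by
  induction l with
  | nil => rfl
  | cons x l ih => simp [List.flatMap_cons, ih]

-- the update lists generated by the two ports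
def pvUpdsA (up Y : List Int) (K : Nat) : List (Nat × Int) :=
  (List.range K).flatMap (fun i => (List.range Y.length).map (fun j =>
    (i, if j ≤ i ∧ i - j < up.length then up.getD (i - j) 0 * Y.getD j 0 else 0)))

def pvUpdsB (s Y : List Int) (st : Nat) : List (Nat × Int) :=
  (List.range s.length).flatMap (fun k => (List.range Y.length).map (fun j =>
    (k * st + j, s.getD k 0 * Y.getD j 0)))

-- characterisation of A's zero-stuffed signal
lemma pv_buildUp_length (L : Int) :
    ∀ (s : List Int) (i n : Nat), s ≠ [] → n = i + s.length →
    (pvBuildUp L n i s).length = (s.length - 1) * pvStep L + 1 := by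
  intro s
  induction s with
  | nil => intro i n h _; exact absurd rfl h
  | cons x rest ih =>
    intro i n _ hn
    rcases rest with _ | ⟨y, rest'⟩
    · have : i = n - 1 := by simp at hn; omega
      simp [pvBuildUp, this]
    · have hne : ¬ i = n - 1 := by simp at hn; omega
      rw [pvBuildUp, if_neg hne]
      have hrec := ih (i + 1) n (by simp) (by simp at hn ⊢; omega)
      simp only [List.length_cons, List.length_append, List.length_replicate, hrec]
      have h2 : (L - 1).toNat = pvStep L - 1 := by unfold pvStep; omega
      have h3 : 1 ≤ pvStep L := by unfold pvStep; omega
      simp only [Nat.add_sub_cancel, Nat.add_one_mul]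
      omega

lemma pv_buildUp_getD (L : Int) :
    ∀ (s : List Int) (i n : Nat), s ≠ [] → n = i + s.length → ∀ t,
    (pvBuildUp L n i s).getD t 0
      = if pvStep L ∣ t ∧ t / pvStep L < s.length then s.getD (t / pvStep L) 0 else 0 := by
  intro s
  induction s with
  | nil => intro i n h _; exact absurd rfl h
  | cons x rest ih =>
    intro i n _ hn t
    have hst : 1 ≤ pvStep L := by unfold pvStep; omega
    rcases rest with _ | ⟨y, rest'⟩
    · have hi : i = n - 1 := by simp at hn; omega
      rw [pvBuildUp, if_pos hi]
      rcases t with _ | u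
      · simp
      · have hcond : ¬ (pvStep L ∣ u + 1 ∧ (u + 1) / pvStep L < ([x] : List Int).length) := by
          rintro ⟨hdvd, hlt⟩
          have h1 : pvStep L ≤ u + 1 := Nat.le_of_dvd (by omega) hdvd
          have h2 : (u + 1) / pvStep L = 0 := by simpa using hlt
          rcases Nat.div_eq_zero_iff.mp h2 with h3 | h3 <;> omega
        rw [if_neg hcond]
        simp
    · have hne : ¬ i = n - 1 := by simp at hn; omega
      rw [pvBuildUp, if_neg hne]
      rcases t with _ | u
      · have hcond : pvStep L ∣ 0 ∧ 0 / pvStep L < (x :: y :: rest').length := by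
          constructor
          · exact Nat.dvd_zero _
          · simp
        rw [if_pos hcond]
        simp
      · rw [List.getD_cons_succ]
        by_cases hu : u < (L - 1).toNat
        · -- inside the inserted zeros
          have hgd : (List.replicate (L - 1).toNat (0 : Int) ++
              pvBuildUp L n (i + 1) (y :: rest')).getD u 0 = 0 := by
            rw [List.getD_eq_getElem _ _ (by simp; omega), List.getElem_append_left (by simpa using hu)]
            simp
          rw [hgd]
          have hcond : ¬ (pvStep L ∣ u + 1 ∧ (u + 1) / pvStep L < (x :: y :: rest').length) := by
            rintro ⟨hdvd, -⟩
            have h1 : pvStep L ≤ u + 1 := Nat.le_of_dvd (by omega) hdvd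
            have h2 : pvStep L = (L - 1).toNat + 1 := rfl
            omega
          rw [if_neg hcond]
        · -- past the zeros: index into the recursive tail
          have hlen : ((List.replicate (L - 1).toNat (0 : Int))).length ≤ u := by
            simpa using not_lt.mp hu
          rw [List.getD_append_right _ _ _ _ hlen]
          have hrec := ih (i + 1) n (by simp) (by simp at hn ⊢; omega)
              (u - (L - 1).toNat)
          rw [List.length_replicate, hrec]
          have hsub : u - (L - 1).toNat = (u + 1) - pvStep L := by unfold pvStep; omega
          have htge : pvStep L ≤ u + 1 := by unfold pvStep; omega
          rw [hsub]
          by_cases hc : pvStep L ∣ (u + 1)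
          · have hc' : pvStep L ∣ (u + 1 - pvStep L) := by
              exact Nat.dvd_sub hc (dvd_refl _)
            have hq : (u + 1) / pvStep L = (u + 1 - pvStep L) / pvStep L + 1 := by
              rw [← Nat.add_div_right _ (by omega : 0 < pvStep L), Nat.sub_add_cancel htge]
            by_cases hlt : (u + 1 - pvStep L) / pvStep L < (y :: rest').length
            · rw [if_pos ⟨hc', hlt⟩, if_pos ⟨hc, by rw [hq]; simpa using Nat.succ_lt_succ hlt⟩]
              rw [hq]
              simp
            · rw [if_neg (by rintro ⟨-, h⟩; exact hlt h), if_neg ?_]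
              rintro ⟨-, h⟩
              rw [hq] at h
              apply hlt
              simp only [List.length_cons] at h ⊢
              omega
          · have hc' : ¬ pvStep L ∣ (u + 1 - pvStep L) := by
              intro h
              exact hc (by
                have h2 : u + 1 = (u + 1 - pvStep L) + pvStep L := by omega
                rw [h2]
                exact Nat.dvd_add h (dvd_refl _))
            rw [if_neg (by rintro ⟨h, -⟩; exact hc' h), if_neg (by rintro ⟨h, -⟩; exact hc h)]

-- A's convolution loop in pvApply normal form
lemma pv_apply_append (l1 l2 : List (Nat × Int)) (init : List Int) :
    pvApply (l1 ++ l2) init = pvApply l2 (pvApply l1 init) := by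
  simp [pvApply, List.foldl_append]

lemma pvA_inner (up Y : List Int) (i : Nat) :
    ∀ (js : List Nat) (acc : List Int), i < acc.length →
    js.foldl (fun (a2 : List Int) (j : Nat) =>
      if (i : Int) - (j : Int) ≥ 0 ∧ (i : Int) - (j : Int) < (up.length : Int) then
        PySem.List.pySetD a2 (i : Int) (PySem.List.pyGetD a2 (i : Int) 0 +
          PySem.List.pyGetD up ((i : Int) - (j : Int)) 0 * PySem.List.pyGetD Y (j : Int) 0)
      else a2) acc
    = pvApply (js.map (fun j =>
        ((i : Nat), if j ≤ i ∧ i - j < up.length then up.getD (i - j) 0 * Y.getD j 0 else 0))) acc := by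
  intro js
  induction js with
  | nil => intro acc _; rfl
  | cons j js ih =>
    intro acc hacc
    simp only [List.foldl_cons, List.map_cons]
    by_cases hc : j ≤ i ∧ i - j < up.length
    · rw [if_pos (by constructor <;> omega), if_pos hc, pv_apply_cons]
      have hij : (i : Int) - (j : Int) = ((i - j : Nat) : Int) := by omega
      rw [hij, PySem.List.pySetD_natCast, PySem.List.pyGetD_natCast,
        PySem.List.pyGetD_natCast, PySem.List.pyGetD_natCast]
      exact ih _ (by rw [List.length_set]; exact hacc)
    · rw [if_neg (by intro h; exact hc (by omega)), if_neg hc, pv_apply_cons,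
        pv_apply_zero _ _ rfl hacc]
      exact ih _ hacc

lemma pvA_outer (up Y : List Int) :
    ∀ (is : List Nat) (acc : List Int), (∀ i ∈ is, i < acc.length) →
    is.foldl (fun (acc : List Int) (i : Nat) =>
      (List.range Y.length).foldl (fun (a2 : List Int) (j : Nat) =>
      if (i : Int) - (j : Int) ≥ 0 ∧ (i : Int) - (j : Int) < (up.length : Int) then
        PySem.List.pySetD a2 (i : Int) (PySem.List.pyGetD a2 (i : Int) 0 +
          PySem.List.pyGetD up ((i : Int) - (j : Int)) 0 * PySem.List.pyGetD Y (j : Int) 0)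
      else a2) acc) acc
    = pvApply (is.flatMap (fun i => (List.range Y.length).map (fun j =>
        ((i : Nat), if j ≤ i ∧ i - j < up.length then up.getD (i - j) 0 * Y.getD j 0 else 0)))) acc := by
  intro is
  induction is with
  | nil => intro acc _; rfl
  | cons i is ih =>
    intro acc h
    simp only [List.foldl_cons, List.flatMap_cons]
    rw [pvA_inner up Y i _ _ (h i (by simp)), pv_apply_append]
    exact ih _ (by intro i' hi'; rw [pv_length_apply]; exact h i' (by simp [hi']))

lemma pvA_out (up Y : List Int) (sv : Int) (hu : up ≠ []) (hy : Y ≠ []) :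
    pvConvolve up Y sv =
      (PySem.List.pyRange sv (sv + ((up.length : Int) + (Y.length : Int) - 1)) 1,
       pvApply (pvUpdsA up Y (up.length + Y.length - 1))
         (List.replicate (up.length + Y.length - 1) 0)) := by
  have hu1 : 1 ≤ up.length := List.length_pos_iff.mpr hu
  have hy1 : 1 ≤ Y.length := List.length_pos_iff.mpr hy
  have hK : ((up.length : Int) + (Y.length : Int) - 1)
      = ((up.length + Y.length - 1 : Nat) : Int) := by omega
  simp only [pvConvolve]
  refine congrArg₂ Prod.mk rfl ?_
  rw [hK]
  simp only [PySem.List.pyRepeat_singleton, Int.toNat_natCast,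
    PySem.List.pyRange_zero_natCast, List.foldl_map]
  rw [pvA_outer up Y (List.range (up.length + Y.length - 1)) _
    (by intro i hi; rw [List.length_replicate]; exact List.mem_range.mp hi)]
  rfl

-- B's scatter loop in pvApply normal form
lemma pvB_inner (s Y : List Int) (st : Nat) (k : Nat) :
    ∀ (js : List Nat) (acc : List Int),
    js.foldl (fun (a2 : List Int) (j : Nat) =>
      a2.set (k * st + j) (a2.getD (k * st + j) 0 + s.getD k 0 * Y.getD j 0)) acc
    = pvApply (js.map (fun j => (k * st + j, s.getD k 0 * Y.getD j 0))) acc := by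
  intro js
  induction js with
  | nil => intro acc; rfl
  | cons j js ih => intro acc; simp only [List.foldl_cons, List.map_cons, pv_apply_cons]; exact ih _

lemma pvB_out (s Y : List Int) (L sv : Int) (hs : s ≠ []) (hy : Y ≠ []) :
    Upsample_alt s Y L sv =
      (PySem.List.pyRange sv (sv + (((s.length : Int) - 1) * (if L > 1 then L else 1) + (Y.length : Int))) 1,
       pvApply (pvUpdsB s Y (pvStep L))
         (List.replicate ((s.length - 1) * pvStep L + Y.length) 0)) := by
  have hs1 : 1 ≤ s.length := List.length_pos_iff.mpr hs
  have hstep := pvStep_cast L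
  have hlen : (((s.length : Int) - 1) * (if L > 1 then L else 1) + (Y.length : Int))
      = (((s.length - 1) * pvStep L + Y.length : Nat) : Int) := by
    rw [← hstep]
    push_cast [Nat.cast_sub hs1]
    ring
  simp only [Upsample_alt]
  refine congrArg₂ Prod.mk rfl ?_
  rw [hlen]
  simp only [PySem.List.pyRepeat_singleton, Int.toNat_natCast]
  rw [PySem.List.enumerate_eq_map_pyRange s 0, PySem.List.enumerate_eq_map_pyRange Y 0]
  simp only [PySem.List.len_eq, PySem.List.pyRange_zero_natCast, List.map_map,
    List.foldl_map, Function.comp_def, PySem.List.pyGetD_natCast]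
  simp only [← hstep]
  have hidx : ∀ (k j : Nat), ((k : Int) * ((pvStep L : Nat) : Int) + (j : Int))
      = ((k * pvStep L + j : Nat) : Int) := by intro k j; push_cast; ring
  simp only [hidx, PySem.List.pySetD_natCast, PySem.List.pyGetD_natCast]
  simp only [pvB_inner s Y (pvStep L)]
  rw [pv_foldl_apply_flatMap]
  rfl

-- the per-entry combinatorial core: gathering over the stuffed signal = scattering the originals
lemma pv_entry_eq (s Y up : List Int) (st : Nat) (hst : 0 < st) (hs : s ≠ [])
    (hlen : up.length = (s.length - 1) * st + 1)
    (hget : ∀ t, up.getD t 0 = if st ∣ t ∧ t / st < s.length then s.getD (t / st) 0 else 0)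
    (t : Nat) :
    (∑ j ∈ Finset.range Y.length,
      (if j ≤ t ∧ t - j < up.length then up.getD (t - j) 0 * Y.getD j 0 else 0))
    = ∑ k ∈ Finset.range s.length, ∑ j ∈ Finset.range Y.length,
        (if k * st + j = t then s.getD k 0 * Y.getD j 0 else 0) := by
  have hs1 : 1 ≤ s.length := List.length_pos_iff.mpr hs
  rw [Finset.sum_comm]
  refine Finset.sum_congr rfl ?_
  intro j _
  by_cases hc : j ≤ t ∧ st ∣ (t - j) ∧ (t - j) / st < s.length
  · obtain ⟨hjt, hdvd, hq⟩ := hc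
    set k0 := (t - j) / st with hk0
    have hk0st : k0 * st = t - j := by
      rw [hk0, Nat.div_mul_cancel hdvd]
    have hup : t - j < up.length := by
      rw [hlen]
      calc t - j = k0 * st := hk0st.symm
        _ ≤ (s.length - 1) * st := Nat.mul_le_mul_right st (by omega)
        _ < (s.length - 1) * st + 1 := by omega
    rw [if_pos ⟨hjt, hup⟩, hget, if_pos ⟨hdvd, hq⟩]
    have hcond : ∀ k, (k * st + j = t) ↔ k = k0 := by
      intro k
      constructor
      · intro h
        have : k * st = t - j := by omega
        rw [hk0, ← this, Nat.mul_div_cancel k hst]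
      · rintro rfl
        omega
    calc s.getD k0 0 * Y.getD j 0
        = if k0 ∈ Finset.range s.length then s.getD k0 0 * Y.getD j 0 else 0 := by
          rw [if_pos (Finset.mem_range.mpr hq)]
      _ = ∑ k ∈ Finset.range s.length, if k = k0 then s.getD k 0 * Y.getD j 0 else 0 := by
          rw [Finset.sum_ite_eq' (Finset.range s.length) k0 (fun k => s.getD k 0 * Y.getD j 0)]
      _ = ∑ k ∈ Finset.range s.length, if k * st + j = t then s.getD k 0 * Y.getD j 0 else 0 :=
          Finset.sum_congr rfl fun k _ => if_congr (hcond k).symm rfl rfl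
  · have hzero : ∀ k ∈ Finset.range s.length,
        (if k * st + j = t then s.getD k 0 * Y.getD j 0 else 0) = 0 := by
      intro k hk
      rw [if_neg]
      intro h
      have hkst : t - j = k * st := by omega
      exact hc ⟨by omega, hkst ▸ dvd_mul_left st k, by
        rw [hkst, Nat.mul_div_cancel k hst]
        exact Finset.mem_range.mp hk⟩
    rw [Finset.sum_eq_zero hzero]
    by_cases hj : j ≤ t ∧ t - j < up.length
    · rw [if_pos hj, hget]
      by_cases hd : st ∣ (t - j) ∧ (t - j) / st < s.length
      · exact absurd ⟨hj.1, hd.1, hd.2⟩ hc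
      · rw [if_neg hd, zero_mul]
    · rw [if_neg hj]

-- sum of the per-index contributions of an update list built by flatMap/map
lemma pv_sum_upds (fn : Nat × Int → Int) {α : Type} (l : List α) (g : α → List (Nat × Int)) :
    ((l.flatMap g).map fn).sum = (l.map (fun x => ((g x).map fn).sum)).sum := by
  rw [List.map_flatMap, pv_sum_flatMap]

lemma pv_getD_replicate (K t : Nat) : (List.replicate K (0 : Int)).getD t 0 = 0 := by
  by_cases h : t < K
  · rw [List.getD_eq_getElem _ _ (by simpa using h)]
    simp
  · rw [List.getD_eq_default _ _ (by simpa using h)]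

-- ===== VERDICT (by name: the statement is the Claim_ definition above) =====
theorem Upsample_spec : Claim_equal_Upsample := by
  intro s Y L sv _ hpre
  obtain ⟨hs, hy⟩ := hpre
  show Upsample s Y L sv = Upsample_alt s Y L sv
  have hs1 : 1 ≤ s.length := List.length_pos_iff.mpr hs
  have hy1 : 1 ≤ Y.length := List.length_pos_iff.mpr hy
  have hst : 0 < pvStep L := by unfold pvStep; omega
  have hupl : (pvBuildUp L s.length 0 s).length = (s.length - 1) * pvStep L + 1 :=
    pv_buildUp_length L s 0 s.length hs (by omega)
  have hupg : ∀ t, (pvBuildUp L s.length 0 s).getD t 0 =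
      if pvStep L ∣ t ∧ t / pvStep L < s.length
      then s.getD (t / pvStep L) 0 else 0 :=
    fun t => pv_buildUp_getD L s 0 s.length hs (by omega) t
  set up := pvBuildUp L s.length 0 s with hup
  have hupne : up ≠ [] := by
    apply List.ne_nil_of_length_pos
    rw [hupl]; omega
  unfold Upsample
  rw [pvA_out up Y sv hupne hy, pvB_out s Y L sv hs hy]
  have hKnat : up.length + Y.length - 1 = (s.length - 1) * pvStep L + Y.length := by
    rw [hupl]; omega
  refine congrArg₂ Prod.mk ?_ ?_
  · -- the index ranges coincide
    congr 1
    rw [hupl, ← pvStep_cast L]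
    push_cast [Nat.cast_sub hs1]
    ring
  · -- the convolved signals coincide, entry by entry
    rw [hKnat]
    set K := (s.length - 1) * pvStep L + Y.length with hK
    have hboundA : ∀ p ∈ pvUpdsA up Y K, p.1 < (List.replicate K (0 : Int)).length := by
      intro p hp
      rw [List.length_replicate]
      simp only [pvUpdsA, List.mem_flatMap, List.mem_map, List.mem_range] at hp
      obtain ⟨i, hi, j, _, rfl⟩ := hp
      simpa using hi
    have hboundB : ∀ p ∈ pvUpdsB s Y (pvStep L), p.1 < (List.replicate K (0 : Int)).length := by
      intro p hp
      rw [List.length_replicate]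
      simp only [pvUpdsB, List.mem_flatMap, List.mem_map, List.mem_range] at hp
      obtain ⟨k, hk, j, hj, rfl⟩ := hp
      calc k * pvStep L + j ≤ (s.length - 1) * pvStep L + j :=
            Nat.add_le_add_right (Nat.mul_le_mul_right _ (by omega)) j
        _ < K := by rw [hK]; omega
    apply List.ext_getElem
    · rw [pv_length_apply, pv_length_apply]
    · intro t h1 h2
      have ht : t < K := by
        rw [pv_length_apply, List.length_replicate] at h1
        exact h1
      rw [← List.getD_eq_getElem _ 0 h1, ← List.getD_eq_getElem _ 0 h2,
        pv_apply_getD _ _ hboundA t, pv_apply_getD _ _ hboundB t,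
        pv_getD_replicate, zero_add, zero_add]
      rw [pvUpdsA, pvUpdsB, pv_sum_upds, pv_sum_upds]
      simp only [List.map_map, Function.comp_def]
      rw [pv_sum_map_range, pv_sum_map_range]
      simp only [pv_sum_map_range]
      have hswap : ∀ i : Nat,
          (∑ j ∈ Finset.range Y.length,
            (if i = t then (if j ≤ i ∧ i - j < up.length then up.getD (i - j) 0 * Y.getD j 0 else 0) else 0))
          = if i = t then (∑ j ∈ Finset.range Y.length,
              (if j ≤ i ∧ i - j < up.length then up.getD (i - j) 0 * Y.getD j 0 else 0)) else 0 := by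
        intro i
        split <;> simp
      calc (∑ i ∈ Finset.range K, ∑ j ∈ Finset.range Y.length,
              (if i = t then (if j ≤ i ∧ i - j < up.length then up.getD (i - j) 0 * Y.getD j 0 else 0) else 0))
          = ∑ i ∈ Finset.range K, (if i = t then (∑ j ∈ Finset.range Y.length,
              (if j ≤ i ∧ i - j < up.length then up.getD (i - j) 0 * Y.getD j 0 else 0)) else 0) :=
            Finset.sum_congr rfl fun i _ => hswap i
        _ = ∑ j ∈ Finset.range Y.length,
              (if j ≤ t ∧ t - j < up.length then up.getD (t - j) 0 * Y.getD j 0 else 0) := by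
            rw [Finset.sum_ite_eq' (Finset.range K) t]
            rw [if_pos (Finset.mem_range.mpr ht)]
        _ = ∑ k ∈ Finset.range s.length, ∑ j ∈ Finset.range Y.length,
              (if k * pvStep L + j = t then s.getD k 0 * Y.getD j 0 else 0) :=
            pv_entry_eq s Y up (pvStep L) hst hs hupl hupg t
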